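-- pv_equiv track=rewrite | github.com/LanChuHoang/hackerrank | sliding_window/range_sum_of_sorted_subarray_sums.py | count_and_sum_subarrays
-- ===== SOURCE A (Python) =====
-- from typing import List, Tuple
--
-- def count_and_sum_subarrays(
--     array: List[int], threshold: int
-- ) -> Tuple[int, int]:
--     count, total_sum, running_sum, current_window_sum = 0, 0, 0, 0
--     start = 0
--     for end in range(len(array)):
--         running_sum += (end - start + 1) * array[end]
--         current_window_sum += array[end]
--         while current_window_sum > threshold:
--             running_sum -= current_window_sum
--             current_window_sum -= array[start]
--             start += 1
--         total_sum += running_sum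
--         count += end - start + 1
--     return count, total_sum
-- ===== SOURCE B (Python) =====
-- from typing import List, Tuple
--
-- def count_and_sum_subarrays(
--     array: List[int], threshold: int
-- ) -> Tuple[int, int]:
--     # Prefix-sum tables: prefix[i] = sum(array[:i]), prefix2[i] = sum(prefix[:i]).
--     # The left boundary is found by the monotone pointer on prefix sums; each
--     # window's count and sum-of-subarray-sums come from the tables in closed form.
--     n = len(array)
--     prefix = [0]
--     for x in array:
--         prefix.append(prefix[-1] + x)
--     prefix2 = [0]
--     for p in prefix:
--         prefix2.append(prefix2[-1] + p)
--     count = 0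
--     total = 0
--     start = 0
--     for end in range(n):
--         while prefix[end + 1] - prefix[start] > threshold:
--             start += 1
--         width = end - start + 1
--         count += width
--         total += width * prefix[end + 1] - (prefix2[end + 1] - prefix2[start])
--     return count, total
-- ===== Notes on version B (the rewrite author's own statement) =====
-- stated objective: alternative
-- what changed: Replaces A's incrementally maintained running_sum/current_window_sum pair (updated inside the shrink loop) by precomputed prefix and prefix-of-prefix tables, so each window's contribution is obtained by a closed-form table formula and the shrink loop only moves the pointer.
import Mathlib
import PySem

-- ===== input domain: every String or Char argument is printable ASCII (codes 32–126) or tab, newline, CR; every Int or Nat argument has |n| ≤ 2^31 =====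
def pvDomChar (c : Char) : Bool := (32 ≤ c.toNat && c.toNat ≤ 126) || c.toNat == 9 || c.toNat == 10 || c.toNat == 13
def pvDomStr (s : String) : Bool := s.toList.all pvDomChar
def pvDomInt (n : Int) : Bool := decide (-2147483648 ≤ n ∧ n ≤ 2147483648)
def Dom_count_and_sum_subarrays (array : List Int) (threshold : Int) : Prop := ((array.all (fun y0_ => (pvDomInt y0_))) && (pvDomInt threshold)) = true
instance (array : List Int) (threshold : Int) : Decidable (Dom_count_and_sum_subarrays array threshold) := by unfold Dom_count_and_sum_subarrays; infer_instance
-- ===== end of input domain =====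

-- B replaces A's incrementally maintained running_sum/current_window_sum pair by precomputed
-- prefix-sum tables and a closed-form per-window formula (alternative decomposition, same cost).


-- ===== PORT A =====
-- inner 'while current_window_sum > threshold' loop of A; state (running_sum, current_window_sum, start).
-- Where Python raises IndexError on array[start] (excluded by Pre_) the loop returns its current state.
def pvWhileA (array : List Int) (threshold : Int) (run cws : Int) (start : Nat) :
    Int × Int × Nat :=
  if cws > threshold then
    match h : PySem.List.pyGet? array (start : Int) with
    | none => (run, cws, start)      -- Python: IndexError here (outside Pre_)
    | some v => pvWhileA array threshold (run - cws) (cws - v) (start + 1)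
  else (run, cws, start)
termination_by array.length - start
decreasing_by
  simp only [PySem.List.pyGet?_natCast] at h
  obtain ⟨hlt, -⟩ := List.getElem?_eq_some_iff.mp h
  omega

-- body of A's 'for end in range(len(array))' loop; state (count, total_sum, running_sum, current_window_sum, start)
def pvStepA (array : List Int) (threshold : Int) :
    Int × Int × Int × Int × Nat → Nat → Int × Int × Int × Int × Nat
  | (count, total, run, cws, start), e =>
    let v := array.getD e 0          -- array[end]; exact: e < len(array) inside the loop
    let run1 := run + ((e : Int) - (start : Int) + 1) * v
    let cws1 := cws + v
    let w := pvWhileA array threshold run1 cws1 start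
    (count + ((e : Int) - (w.2.2 : Int) + 1), total + w.1, w.1, w.2.1, w.2.2)

def count_and_sum_subarrays (array : List Int) (threshold : Int) : Int × Int :=
  let s := (List.range array.length).foldl (pvStepA array threshold) (0, 0, 0, 0, 0)
  (s.1, s.2.1)

-- ===== PORT B =====
-- 'prefix = [0]; for x in ys: prefix.append(prefix[-1] + x)' — the pair carries (list, its last element)
def pvBuild (ys : List Int) : List Int × Int :=
  ys.foldl (fun acc x => (acc.1 ++ [acc.2 + x], acc.2 + x)) ([0], 0)

-- 'while prefix[end+1] - prefix[start] > threshold: start += 1' (pe = prefix[end+1]);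
-- where Python raises IndexError on prefix[start] (outside Pre_) it returns the current start.
def pvWhileB (P : List Int) (threshold pe : Int) (start : Nat) : Nat :=
  match h : PySem.List.pyGet? P (start : Int) with
  | none => start                    -- Python: IndexError here (outside Pre_)
  | some ps => if pe - ps > threshold then pvWhileB P threshold pe (start + 1) else start
termination_by P.length - start
decreasing_by
  simp only [PySem.List.pyGet?_natCast] at h
  obtain ⟨hlt, -⟩ := List.getElem?_eq_some_iff.mp h
  omega

-- body of B's 'for end in range(n)' loop; state (count, total, start)
def pvStepB (P P2 : List Int) (threshold : Int) :
    Int × Int × Nat → Nat → Int × Int × Nat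
  | (count, total, start), e =>
    let pe := P.getD (e + 1) 0       -- prefix[end+1]; exact: end+1 < len(prefix)
    let start2 := pvWhileB P threshold pe start
    let width : Int := (e : Int) - (start2 : Int) + 1
    (count + width,
     total + (width * pe - (P2.getD (e + 1) 0 - P2.getD start2 0)),
     start2)

def count_and_sum_subarrays_alt (array : List Int) (threshold : Int) : Int × Int :=
  let P := (pvBuild array).1
  let P2 := (pvBuild P).1
  let s := (List.range array.length).foldl (pvStepB P P2 threshold) (0, 0, 0)
  (s.1, s.2.1)

-- ===== PRECONDITION & SPEC =====
-- pvPfx array k = sum of the first k elements (Python's prefix sum)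
def pvPfx (array : List Int) (k : Nat) : Int := (array.take k).sum

-- Pre_ holds exactly when A returns normally: for every end position some prefix boundary s
-- keeps the window sum prefix[end+1]-prefix[s] ≤ threshold (otherwise the shrink loop runs off
-- the end of the array and Python raises IndexError; B raises there too).
def Pre_count_and_sum_subarrays (array : List Int) (threshold : Int) : Prop :=
  ∀ e ∈ List.range array.length, ∃ s ∈ List.range (array.length + 1),
    pvPfx array (e + 1) - pvPfx array s ≤ threshold

instance (array : List Int) (threshold : Int) :
    Decidable (Pre_count_and_sum_subarrays array threshold) := by
  unfold Pre_count_and_sum_subarrays; infer_instance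

def pvWitness_count_and_sum_subarrays : List Int × Int := ([1, 2], 3)

def Spec_count_and_sum_subarrays (array : List Int) (threshold : Int) (out : Int × Int) : Prop :=
  out = count_and_sum_subarrays_alt array threshold
instance (array : List Int) (threshold : Int) (out : Int × Int) : Decidable (Spec_count_and_sum_subarrays array threshold out) := by unfold Spec_count_and_sum_subarrays; infer_instance

-- ===== CLAIM (what is proved, stated in full; the proofs are below) =====
def Claim_equal_count_and_sum_subarrays : Prop := ∀ (array : List Int) (threshold : Int), Dom_count_and_sum_subarrays array threshold → Pre_count_and_sum_subarrays array threshold → Spec_count_and_sum_subarrays array threshold (count_and_sum_subarrays array threshold)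

-- ===== LEMMAS AND PROOFS =====

-- prefix-of-prefix sums: pvQfx array k = sum_{i<k} pvPfx array i
def pvQfx (array : List Int) (k : Nat) : Int := ((List.range k).map (pvPfx array)).sum

theorem pvPfx_succ (array : List Int) (k : Nat) :
    pvPfx array (k + 1) = pvPfx array k + array.getD k 0 := by
  simp [pvPfx, List.take_add_one, List.getD_eq_getElem?_getD]
  cases h : array[k]? <;> simp_all

theorem pvQfx_succ (array : List Int) (k : Nat) :
    pvQfx array (k + 1) = pvQfx array k + pvPfx array k := by
  simp [pvQfx, List.range_succ]

-- characterization of the prefix-building fold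
theorem pvBuild_eq (ys : List Int) :
    (pvBuild ys).1 = (List.range (ys.length + 1)).map (fun k => (ys.take k).sum) := by
  have main : ∀ (zs : List Int) (l : List Int) (s : Int),
      zs.foldl (fun acc x => (acc.1 ++ [acc.2 + x], acc.2 + x)) (l, s) =
        (l ++ (List.range zs.length).map (fun k => s + (zs.take (k + 1)).sum),
         s + zs.sum) := by
    intro zs
    induction zs with
    | nil => intro l s; simp
    | cons a as ih =>
      intro l s
      simp only [List.foldl_cons, ih, List.length_cons]
      rw [List.range_succ_eq_map]
      refine Prod.ext ?_ (by simp [add_assoc])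
      simp [List.append_assoc, Function.comp_def, add_assoc]
  show (ys.foldl _ ([0], 0)).1 = _
  rw [main]
  rw [List.range_succ_eq_map]
  simp [Function.comp_def]

theorem pvP_getD (array : List Int) (k : Nat) (hk : k ≤ array.length) :
    ((pvBuild array).1).getD k 0 = pvPfx array k := by
  rw [pvBuild_eq]
  rw [List.getD_eq_getElem?_getD, List.getElem?_map, List.getElem?_range (by omega)]
  rfl

theorem pvP_length (array : List Int) : ((pvBuild array).1).length = array.length + 1 := by
  rw [pvBuild_eq]; simp

theorem pvP2_getD (array : List Int) (k : Nat) (hk : k ≤ array.length + 1) :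
    ((pvBuild ((pvBuild array).1)).1).getD k 0 = pvQfx array k := by
  rw [pvBuild_eq ((pvBuild array).1)]
  rw [List.getD_eq_getElem?_getD, List.getElem?_map,
      List.getElem?_range (by rw [pvP_length]; omega)]
  show ((((pvBuild array).1).take k).sum) = _
  rw [pvBuild_eq, ← List.map_take, List.take_range]
  simp [Nat.min_eq_left hk, pvQfx]
  rfl

theorem pvGetA (array : List Int) (start : Nat) (h : start < array.length) :
    PySem.List.pyGet? array (start : Int) = some (array.getD start 0) := by
  rw [PySem.List.pyGet?_natCast, List.getElem?_eq_getElem h, List.getD_eq_getElem array 0 h]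

theorem pvGetP (array : List Int) (start : Nat) (h : start ≤ array.length) :
    PySem.List.pyGet? (pvBuild array).1 (start : Int) = some (pvPfx array start) := by
  have hl : start < ((pvBuild array).1).length := by rw [pvP_length]; omega
  rw [PySem.List.pyGet?_natCast, List.getElem?_eq_getElem hl,
      ← List.getD_eq_getElem _ 0 hl, pvP_getD array start h]

theorem pvWhileB_stop (P : List Int) (t pe : Int) (start : Nat) (ps : Int)
    (hg : PySem.List.pyGet? P (start : Int) = some ps) (hc : ¬ pe - ps > t) :
    pvWhileB P t pe start = start := by
  rw [pvWhileB]; split <;> simp_all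

theorem pvWhileB_step (P : List Int) (t pe : Int) (start : Nat) (ps : Int)
    (hg : PySem.List.pyGet? P (start : Int) = some ps) (hc : pe - ps > t) :
    pvWhileB P t pe start = pvWhileB P t pe (start + 1) := by
  rw [pvWhileB]; split <;> simp_all

theorem pvWhileA_stop (array : List Int) (t run cws : Int) (start : Nat)
    (hc : ¬ cws > t) : pvWhileA array t run cws start = (run, cws, start) := by
  rw [pvWhileA]; simp [hc]

theorem pvWhileA_step (array : List Int) (t run cws : Int) (start : Nat) (v : Int)
    (hg : PySem.List.pyGet? array (start : Int) = some v) (hc : cws > t) :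
    pvWhileA array t run cws start = pvWhileA array t (run - cws) (cws - v) (start + 1) := by
  rw [pvWhileA]; rw [if_pos hc]; split <;> simp_all

-- the two shrink loops move the pointer identically and A's running_sum drops by the closed form
theorem pvWhile_eq (array : List Int) (t pe : Int) (m : Nat) (hmn : m ≤ array.length)
    (hstop : pe - pvPfx array m ≤ t) :
    ∀ d run (start : Nat), start ≤ m → m - start = d →
      pvWhileB (pvBuild array).1 t pe start ≤ m ∧
      pvWhileA array t run (pe - pvPfx array start) start =
        (run - (((pvWhileB (pvBuild array).1 t pe start : Int) - (start : Int)) * pe -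
                 (pvQfx array (pvWhileB (pvBuild array).1 t pe start) - pvQfx array start)),
         pe - pvPfx array (pvWhileB (pvBuild array).1 t pe start),
         pvWhileB (pvBuild array).1 t pe start) := by
  intro d
  induction d with
  | zero =>
    intro run start hsm hd
    have hse : start = m := by omega
    subst hse
    have hc : ¬ pe - pvPfx array start > t := by omega
    rw [pvWhileB_stop _ t pe start _ (pvGetP array start hmn) hc,
        pvWhileA_stop _ _ _ _ _ hc]
    refine ⟨le_refl _, ?_⟩
    simp
  | succ d ih =>
    intro run start hsm hd
    by_cases hc : pe - pvPfx array start > t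
    · have hsl : start < m := by
        rcases Nat.lt_or_ge start m with h | h
        · exact h
        · exfalso; have : start = m := by omega
          subst this; omega
      have hgP := pvGetP array start (by omega)
      have hgA := pvGetA array start (by omega)
      rw [pvWhileB_step _ _ _ _ _ hgP hc, pvWhileA_step _ _ _ _ _ _ hgA hc]
      have hv : pe - pvPfx array start - array.getD start 0 = pe - pvPfx array (start + 1) := by
        rw [pvPfx_succ]; ring
      rw [hv]
      obtain ⟨h1, h2⟩ := ih (run - (pe - pvPfx array start)) (start + 1) (by omega) (by omega)
      refine ⟨h1, ?_⟩
      rw [h2]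
      refine Prod.ext ?_ rfl
      show run - (pe - pvPfx array start) -
          ((((pvWhileB (pvBuild array).1 t pe (start + 1) : Nat) : Int) - ((start + 1 : Nat) : Int)) * pe -
            (pvQfx array (pvWhileB (pvBuild array).1 t pe (start + 1)) - pvQfx array (start + 1))) = _
      rw [pvQfx_succ]
      push_cast
      ring
    · rw [pvWhileB_stop _ t pe start _ (pvGetP array start (by omega)) hc,
          pvWhileA_stop _ _ _ _ _ hc]
      refine ⟨hsm, ?_⟩
      simp

-- main loop invariant, relating A's five-component state to B's three-component state
theorem pvLoop_inv (array : List Int) (t : Int) (m : Nat) (hmn : m ≤ array.length)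
    (hmax : ∀ s, s ≤ array.length → pvPfx array s ≤ pvPfx array m)
    (hpre : Pre_count_and_sum_subarrays array t) :
    ∀ e, e ≤ array.length →
      ((List.range e).foldl (pvStepA array t) (0, 0, 0, 0, 0) =
        (((List.range e).foldl (pvStepB (pvBuild array).1 (pvBuild (pvBuild array).1).1 t) (0, 0, 0)).1, ((List.range e).foldl (pvStepB (pvBuild array).1 (pvBuild (pvBuild array).1).1 t) (0, 0, 0)).2.1,
         ((e : Int) - ((((List.range e).foldl (pvStepB (pvBuild array).1 (pvBuild (pvBuild array).1).1 t) (0, 0, 0)).2.2 : Nat) : Int)) * pvPfx array e -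
           (pvQfx array e - pvQfx array ((List.range e).foldl (pvStepB (pvBuild array).1 (pvBuild (pvBuild array).1).1 t) (0, 0, 0)).2.2),
         pvPfx array e - pvPfx array ((List.range e).foldl (pvStepB (pvBuild array).1 (pvBuild (pvBuild array).1).1 t) (0, 0, 0)).2.2, ((List.range e).foldl (pvStepB (pvBuild array).1 (pvBuild (pvBuild array).1).1 t) (0, 0, 0)).2.2) ∧ ((List.range e).foldl (pvStepB (pvBuild array).1 (pvBuild (pvBuild array).1).1 t) (0, 0, 0)).2.2 ≤ m) := by
  intro e
  induction e with
  | zero =>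
    intro _
    simp [pvQfx, pvPfx]
  | succ e ih =>
    intro he
    obtain ⟨hA, hle⟩ := ih (by omega)
    rw [List.range_succ, List.foldl_append, List.foldl_append, hA]
    simp only [List.foldl_cons, List.foldl_nil]
    generalize hbE : (List.range e).foldl (pvStepB (pvBuild array).1 (pvBuild (pvBuild array).1).1 t) (0, 0, 0) = bE at *
    obtain ⟨c, tot, s⟩ := bE
    simp only [pvStepA, pvStepB]
    rw [pvP_getD array (e + 1) (by omega)]
    have hv : array.getD e 0 = pvPfx array (e + 1) - pvPfx array e := by
      rw [pvPfx_succ]; ring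
    rw [hv]
    have hcws : pvPfx array e - pvPfx array s + (pvPfx array (e + 1) - pvPfx array e) =
        pvPfx array (e + 1) - pvPfx array s := by ring
    rw [hcws]
    obtain ⟨s', hs', hs't⟩ := hpre e (List.mem_range.mpr (by omega))
    have hstop : pvPfx array (e + 1) - pvPfx array m ≤ t := by
      have := hmax s' (by have := List.mem_range.mp hs'; omega)
      omega
    obtain ⟨h1, h2⟩ := pvWhile_eq array t (pvPfx array (e + 1)) m hmn hstop (m - s)
      (((e : Int) - (s : Int)) * pvPfx array e - (pvQfx array e - pvQfx array s) +
        ((e : Int) - (s : Int) + 1) * (pvPfx array (e + 1) - pvPfx array e)) s hle rfl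
    rw [h2]
    refine ⟨?_, h1⟩
    rw [pvP2_getD array (e + 1) (by omega), pvP2_getD array _ (by omega)]
    simp only [Prod.mk.injEq]
    refine ⟨trivial, ?_, ?_, trivial⟩
    · rw [pvQfx_succ]; ring
    · rw [pvQfx_succ]; push_cast; ring
    

-- ===== VERDICT (by name: the statement is the Claim_ definition above) =====
theorem count_and_sum_subarrays_spec : Claim_equal_count_and_sum_subarrays := by
  intro array t _ hpre
  unfold Spec_count_and_sum_subarrays
  obtain ⟨m, hm, hmax⟩ := Finset.exists_max_image (Finset.range (array.length + 1))
    (pvPfx array) ⟨0, Finset.mem_range.mpr (by omega)⟩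
  have hmn : m ≤ array.length := by have := Finset.mem_range.mp hm; omega
  have hmax' : ∀ s, s ≤ array.length → pvPfx array s ≤ pvPfx array m := fun s hs =>
    hmax s (Finset.mem_range.mpr (by omega))
  obtain ⟨hA, -⟩ := pvLoop_inv array t m hmn hmax' hpre array.length (le_refl _)
  simp only [count_and_sum_subarrays, count_and_sum_subarrays_alt]
  rw [hA]
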